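-- pv_equiv track=rewrite | github.com/IDIAS-Tufts/IDIAS | final.py | seperate_num
-- ===== SOURCE A (Python) =====
-- def seperate_num(inStr):
--     num_start = 0
--     num_end = 0
--
--     for i in range(len(inStr)):
--         if inStr[i] == "#":
--             num_start = i + 1
--
--         if inStr[i] == ":":
--             num_end = i
--             break
--
--     try:
--         num = int(inStr[num_start:num_end])
--     except ValueError:
--         return False, None, None
--
--     return True, num, inStr[num_end+2: len(inStr)]
-- ===== SOURCE B (Python) =====
-- def seperate_num(inStr):
--     # single-pass state machine over a consuming iterator: accumulate the
--     # candidate number's characters in a buffer (cleared at each '#'); at the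
--     # first ':' parse the buffer, skip one character, and drain the iterator
--     # into the tail -- no indices and no slicing anywhere.
--     buf = []
--     it = iter(inStr)
--     for c in it:
--         if c == ':':
--             try:
--                 num = int(''.join(buf))
--             except ValueError:
--                 return False, None, None
--             next(it, None)
--             return True, num, ''.join(it)
--         if c == '#':
--             buf.clear()
--         else:
--             buf.append(c)
--     return False, None, None
-- ===== Notes on version B (the rewrite author's own statement) =====
-- stated objective: simpler
-- what changed: Replaces A's index-tracking scan plus post-hoc slicing (record the last hash and first colon positions, then slice twice) with a one-pass consuming-iterator state machine that accumulates the number's characters in a buffer cleared at each hash mark and drains the remaining iterator into the tail, so no indices or slices are used at all.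
import Mathlib
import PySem

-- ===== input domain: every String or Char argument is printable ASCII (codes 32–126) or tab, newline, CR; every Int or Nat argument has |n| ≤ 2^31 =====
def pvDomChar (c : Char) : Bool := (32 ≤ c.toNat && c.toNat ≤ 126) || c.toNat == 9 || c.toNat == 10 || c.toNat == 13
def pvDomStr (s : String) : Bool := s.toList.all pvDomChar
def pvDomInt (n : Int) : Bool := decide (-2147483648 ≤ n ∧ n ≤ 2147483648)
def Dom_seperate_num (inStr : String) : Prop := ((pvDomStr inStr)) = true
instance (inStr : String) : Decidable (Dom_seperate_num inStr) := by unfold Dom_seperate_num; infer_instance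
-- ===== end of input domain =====

-- B replaces A's index-tracking scan + slicing with a one-pass consuming-iterator
-- state machine that accumulates the number's characters in a buffer (cleared at
-- each hash mark) and drains the iterator into the tail; objective: simpler.

-- ===== PORT A =====
-- the index loop of A: tracks num_start / num_end, breaks at the first ':'
def loopA : List Char → Nat → Nat → Nat → Nat × Nat
  | [], _, ns, ne => (ns, ne)
  | c :: rest, i, ns, ne =>
    let ns' := if c = '#' then i + 1 else ns
    if c = ':' then (ns', i) else loopA rest (i + 1) ns' ne

def seperate_num (inStr : String) : Bool × Option Int × Option String :=
  let cs := inStr.toList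
  let r := loopA cs 0 0 0
  match PySem.Int.ofChars? (PySem.List.slice cs (some (r.1 : Int)) (some (r.2 : Int))) with
  | none => (false, none, none)
  | some num =>
    (true, some num,
      some (String.ofList (PySem.List.slice cs (some ((r.2 : Int) + 2)) (some (cs.length : Int)))))

-- ===== PORT B =====
-- B's iterator loop: buf is the characters accumulated since the last '#';
-- at the first ':' it yields (buf, rest of the iterator after skipping one char)
def loopB : List Char → List Char → Option (List Char × List Char)
  | [], _ => none
  | c :: rest, buf =>
    if c = ':' then some (buf, rest.drop 1)
    else loopB rest (if c = '#' then [] else buf ++ [c])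

def seperate_num_alt (inStr : String) : Bool × Option Int × Option String :=
  match loopB inStr.toList [] with
  | none => (false, none, none)
  | some (buf, tl) =>
    match PySem.Int.ofChars? buf with
    | none => (false, none, none)
    | some num => (true, some num, some (String.ofList tl))

-- ===== PRECONDITION & SPEC =====
def Spec_seperate_num (inStr : String) (out : Bool × Option Int × Option String) : Prop := out = seperate_num_alt inStr
instance (inStr : String) (out : Bool × Option Int × Option String) : Decidable (Spec_seperate_num inStr out) := by unfold Spec_seperate_num; infer_instance

-- ===== CLAIM (what is proved, stated in full; the proofs are below) =====
def Claim_equal_seperate_num : Prop := ∀ (inStr : String), Dom_seperate_num inStr → Spec_seperate_num inStr (seperate_num inStr)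

-- ===== LEMMAS AND PROOFS =====

-- proof-only decomposition tools: split at the first ':', part after the last '#'
def partColon : List Char → Option (List Char × List Char)
  | [] => none
  | c :: rest =>
    if c = ':' then some ([], rest)
    else match partColon rest with
      | none => none
      | some (h, t) => some (c :: h, t)

def alhGo : List Char → List Char → List Char
  | [], acc => acc.reverse
  | c :: rest, acc => if c = '#' then alhGo rest [] else alhGo rest (c :: acc)

def afterLastHash (cs : List Char) : List Char := alhGo cs []

theorem alhGo_of_not_mem (l : List Char) : ∀ acc, '#' ∉ l → alhGo l acc = acc.reverse ++ l := by
  induction l with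
  | nil => simp [alhGo]
  | cons c rest ih =>
    intro acc h
    have hc : c ≠ '#' := by simp at h; tauto
    have hr : '#' ∉ rest := by simp at h; tauto
    simp [alhGo, hc, ih _ hr]

theorem alhGo_of_mem (l : List Char) : ∀ acc, '#' ∈ l → alhGo l acc = alhGo l [] := by
  induction l with
  | nil => simp
  | cons c rest ih =>
    intro acc h
    by_cases hc : c = '#'
    · simp [alhGo, hc]
    · have hr : '#' ∈ rest := by simp at h; tauto
      simp [alhGo, hc, ih _ hr]

theorem afterLastHash_cons_of_mem (c : Char) (rest : List Char) (h : '#' ∈ rest) :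
    afterLastHash (c :: rest) = afterLastHash rest := by
  by_cases hc : c = '#'
  · simp [afterLastHash, alhGo, hc]
  · simp [afterLastHash, alhGo, hc, alhGo_of_mem rest [c] h]

-- decomposition: if '#' occurs, the string is pre ++ '#' :: afterLastHash
theorem afterLastHash_split (h : List Char) (hm : '#' ∈ h) :
    ∃ pre, h = pre ++ '#' :: afterLastHash h := by
  induction h with
  | nil => simp at hm
  | cons c rest ih =>
    by_cases hr : '#' ∈ rest
    · obtain ⟨pre, hpre⟩ := ih hr
      exact ⟨c :: pre, by rw [afterLastHash_cons_of_mem c rest hr]; simp [← hpre]⟩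
    · have hc : c = '#' := by simp [hr] at hm; tauto
      refine ⟨[], ?_⟩
      simp [hc, afterLastHash, alhGo, alhGo_of_not_mem rest [] hr]

-- partColon decomposes the string at the first ':'
theorem partColon_some (cs h t : List Char) (hp : partColon cs = some (h, t)) :
    cs = h ++ ':' :: t := by
  induction cs generalizing h t with
  | nil => simp [partColon] at hp
  | cons c rest ih =>
    by_cases hc : c = ':'
    · simp only [partColon] at hp
      rw [if_pos hc] at hp
      cases Option.some.inj hp
      simp [hc]
    · simp only [partColon] at hp
      rw [if_neg hc] at hp
      match hrec : partColon rest with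
      | none => rw [hrec] at hp; simp at hp
      | some (h', t') =>
        rw [hrec] at hp
        have hp' : (c :: h', t') = (h, t) := Option.some.inj hp
        cases hp'
        rw [ih _ _ hrec]
        simp

-- B's loop in terms of the decomposition: the buffer at the colon is alhGo of the head
theorem loopB_spec (cs : List Char) : ∀ buf,
    loopB cs buf = match partColon cs with
      | none => none
      | some (h, t) => some (alhGo h buf.reverse, t.drop 1) := by
  induction cs with
  | nil => intro buf; simp [loopB, partColon]
  | cons c rest ih =>
    intro buf
    by_cases hc : c = ':'
    · simp [loopB, partColon, hc, alhGo]
    · simp only [loopB, partColon]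
      rw [if_neg hc, if_neg hc, ih]
      match hrec : partColon rest with
      | none => simp
      | some (h', t') =>
        simp only
        by_cases hch : c = '#'
        · simp [hch, alhGo]
        · simp [hch, alhGo]

-- A's loop when there is no ':' : num_end stays 0
theorem loopA_no_colon (cs : List Char) : ∀ i ns, partColon cs = none →
    (loopA cs i ns 0).2 = 0 := by
  induction cs with
  | nil => intro i ns _; simp [loopA]
  | cons c rest ih =>
    intro i ns hp
    by_cases hc : c = ':'
    · simp only [partColon] at hp
      rw [if_pos hc] at hp
      simp at hp
    · simp only [partColon] at hp
      rw [if_neg hc] at hp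
      match hrec : partColon rest with
      | none => simp [loopA, hc, ih _ _ hrec]
      | some (h', t') => rw [hrec] at hp; simp at hp

-- A's loop when ':' occurs: num_end = offset of the first ':', num_start after the last '#'
theorem loopA_colon (cs : List Char) : ∀ i ns h t, partColon cs = some (h, t) →
    loopA cs i ns 0 =
      (if '#' ∈ h then i + (h.length - (afterLastHash h).length) else ns, i + h.length) := by
  induction cs with
  | nil => intro i ns h t hp; simp [partColon] at hp
  | cons c rest ih =>
    intro i ns h t hp
    by_cases hc : c = ':'
    · simp only [partColon] at hp
      rw [if_pos hc] at hp
      cases Option.some.inj hp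
      have hne : c ≠ '#' := by rw [hc]; decide
      simp [loopA, hc]
    · simp only [partColon] at hp
      rw [if_neg hc] at hp
      match hrec : partColon rest with
      | none => rw [hrec] at hp; simp at hp
      | some (h', t') =>
        rw [hrec] at hp
        have hp' : (c :: h', t') = (h, t) := Option.some.inj hp
        cases hp'
        simp only [loopA]
        rw [if_neg hc]
        by_cases hch : c = '#'
        · rw [if_pos hch, ih (i+1) (i+1) _ _ hrec]
          by_cases hm : '#' ∈ h'
          · obtain ⟨pre, hpre⟩ := afterLastHash_split h' hm
            have hlen : h'.length = pre.length + 1 + (afterLastHash h').length := by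
              have := congrArg List.length hpre
              simp at this
              omega
            have hm2 : '#' ∈ c :: h' := by simp [hch]
            have hcons := afterLastHash_cons_of_mem c h' hm
            simp [hm, hm2, hcons]
            constructor
            · omega
            · omega
          · have hm2 : '#' ∈ c :: h' := by simp [hch]
            have hnone : afterLastHash (c :: h') = h' := by
              rw [hch]
              simp [afterLastHash, alhGo, alhGo_of_not_mem h' [] hm]
            simp [hm, hm2, hnone]
            omega
        · rw [if_neg hch, ih (i+1) ns _ _ hrec]
          have hmem : ('#' ∈ c :: h') ↔ ('#' ∈ h') := by
            simp
            intro hcc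
            exact absurd hcc.symm hch
          by_cases hm : '#' ∈ h'
          · obtain ⟨pre, hpre⟩ := afterLastHash_split h' hm
            have hlen : h'.length = pre.length + 1 + (afterLastHash h').length := by
              have := congrArg List.length hpre
              simp at this
              omega
            have hcons := afterLastHash_cons_of_mem c h' hm
            simp [hm, hmem.mpr hm, hcons]
            constructor
            · omega
            · omega
          · have hm2 : '#' ∉ c :: h' := fun hx => hm (hmem.mp hx)
            simp [hm, hm2]
            omega

-- ===== VERDICT (by name: the statement is the Claim_ definition above) =====
theorem seperate_num_spec : Claim_equal_seperate_num := by
  unfold Claim_equal_seperate_num Spec_seperate_num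
  intro inStr _
  unfold seperate_num seperate_num_alt
  rw [loopB_spec inStr.toList []]
  match hp : partColon inStr.toList with
  | none =>
    have h2 := loopA_no_colon inStr.toList 0 0 hp
    have hsl : PySem.List.slice inStr.toList (some ((loopA inStr.toList 0 0 0).1 : Int))
        (some ((loopA inStr.toList 0 0 0).2 : Int)) = [] := by
      rw [h2]
      rw [PySem.List.slice_toNat _ (by positivity) (by norm_num)]
      simp
    simp only [hsl]
    rfl
  | some (h, t) =>
    have hcs := partColon_some inStr.toList h t hp
    have hl := loopA_colon inStr.toList 0 0 h t hp
    simp only [hl]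
    -- the number slice equals afterLastHash h
    have hnum : PySem.List.slice inStr.toList
        (some (((if '#' ∈ h then 0 + (h.length - (afterLastHash h).length) else 0) : Nat) : Int))
        (some ((0 + h.length : Nat) : Int)) = afterLastHash h := by
      by_cases hm : '#' ∈ h
      · obtain ⟨pre, hpre⟩ := afterLastHash_split h hm
        have hlen : h.length = pre.length + 1 + (afterLastHash h).length := by
          have := congrArg List.length hpre
          simp at this
          omega
        rw [if_pos hm, PySem.List.slice_toNat _ (by positivity) (by positivity)]
        simp only [Int.toNat_natCast]
        rw [hcs]
        rw [show (0 + (h.length - (afterLastHash h).length)) = (pre ++ ['#']).length by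
          simp; omega]
        rw [show 0 + h.length - (pre ++ ['#']).length = (afterLastHash h).length by
          simp; omega]
        rw [show h ++ ':' :: t = (pre ++ ['#']) ++ (afterLastHash h ++ ':' :: t) by
          conv_lhs => rw [hpre]
          simp]
        rw [List.drop_left, List.take_left]
      · have hno : afterLastHash h = h := by
          simp [afterLastHash, alhGo_of_not_mem h [] hm]
        rw [if_neg hm, PySem.List.slice_toNat _ (by norm_num) (by positivity)]
        simp only [Int.toNat_natCast]
        rw [hcs, hno]
        simp
    rw [hnum]
    have hbuf : alhGo h List.nil.reverse = afterLastHash h := rfl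
    rw [hbuf]
    cases hq : PySem.Int.ofChars? (afterLastHash h) with
    | none => rfl
    | some num =>
      have htail : PySem.List.slice inStr.toList (some (((0 + h.length : Nat) : Int) + 2))
          (some (inStr.toList.length : Int)) = t.drop 1 := by
        rw [show (((0 + h.length : Nat) : Int) + 2) = ((h.length + 2 : Nat) : Int) by
            push_cast; ring,
          PySem.List.slice_toNat _ (by positivity) (by positivity)]
        simp only [Int.toNat_natCast]
        rw [hcs]
        rw [show h ++ ':' :: t = (h ++ [':']) ++ t by simp,
          show h.length + 2 = (h ++ [':']).length + 1 by simp]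
        rw [List.drop_length_add_append]
        apply List.take_of_length_le
        simp
        omega
      rw [htail]
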